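-- pv_equiv track=rewrite | github.com/AndreeaCucos/Garbage-collection | project/backend/graph.py | get_odd_vertices
-- ===== SOURCE A (Python) =====
-- def get_odd_vertices(matrix):
--     """
--         Funcția get_odd_vertices returnează nodurile de grad impar.
--
--         Parametrii:
--             matrix (list(list)): matricea de adiacență a digrafului.
--
--         Returnează:
--             (list): listă formată din nodurile de grad impar
--                     (noduri a căror diferență dintre gradul de ieșire
--                      și gradul de intrare este diferită de 0).
--     """
--     odds = {}
--     size = len(matrix)
--     for i in range(size):
--         in_degree = 0
--         out_degree = 0
--         for j in range(size):
--             if matrix[i][j] != 0: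
--                 out_degree += 1
--             if matrix[j][i] != 0:
--                 in_degree += 1
--         total = out_degree - in_degree
--         if total != 0:
--             odds[i] = total
--     return odds
-- ===== SOURCE B (Python) =====
-- def get_odd_vertices(matrix):
--     size = len(matrix)
--     net = {}
--     for i in range(size):
--         for j in range(size):
--             if matrix[i][j] != 0:
--                 net[i] = net.get(i, 0) + 1
--                 net[j] = net.get(j, 0) - 1
--     odds = {}
--     for i in range(size):
--         t = net.get(i, 0)
--         if t != 0:
--             odds[i] = t
--     return odds
-- ===== Notes on version B (the rewrite author's own statement) =====
-- stated objective: alternative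
-- what changed: One pass over all cells accumulating a single net (out-minus-in) degree counter, instead of recomputing a row count and a column count separately for every node; a second simple loop filters the nonzero entries into the result dict.
import Mathlib
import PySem

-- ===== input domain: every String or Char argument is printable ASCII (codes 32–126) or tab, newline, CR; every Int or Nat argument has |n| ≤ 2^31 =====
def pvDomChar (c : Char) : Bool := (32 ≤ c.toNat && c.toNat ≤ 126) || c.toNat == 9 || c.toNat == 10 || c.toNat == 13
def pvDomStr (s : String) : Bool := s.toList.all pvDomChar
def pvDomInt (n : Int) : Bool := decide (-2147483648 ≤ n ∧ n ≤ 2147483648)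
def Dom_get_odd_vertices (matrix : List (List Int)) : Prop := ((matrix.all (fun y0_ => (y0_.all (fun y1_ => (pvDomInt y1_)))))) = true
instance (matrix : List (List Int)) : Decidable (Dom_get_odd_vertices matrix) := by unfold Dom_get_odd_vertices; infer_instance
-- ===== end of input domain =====

-- B replaces A's per-node row-and-column recount by ONE pass over all cells accumulating a
-- net (out-minus-in) degree counter, then a filter pass keeps the nonzero entries; same cost class.

-- ===== PORT A =====
def get_odd_vertices (matrix : List (List Int)) : List (Int × Int) :=
  let size : Int := matrix.length
  ((PySem.List.pyRange 0 size 1).foldl (fun (odds : PySem.Dict Int Int) i =>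
    let st := (PySem.List.pyRange 0 size 1).foldl (fun (st : Int × Int) j =>
      let st := if PySem.List.pyGetD (PySem.List.pyGetD matrix i []) j 0 ≠ 0 then (st.1, st.2 + 1) else st
      let st := if PySem.List.pyGetD (PySem.List.pyGetD matrix j []) i 0 ≠ 0 then (st.1 + 1, st.2) else st
      st) ((0 : Int), (0 : Int))
    let total := st.2 - st.1
    if total ≠ 0 then odds.insert i total else odds) PySem.Dict.empty).items

-- ===== PORT B =====
def get_odd_vertices_alt (matrix : List (List Int)) : List (Int × Int) :=
  let size : Int := matrix.length
  let net : PySem.Dict Int Int := (PySem.List.pyRange 0 size 1).foldl (fun net i =>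
    (PySem.List.pyRange 0 size 1).foldl (fun (net : PySem.Dict Int Int) j =>
      if PySem.List.pyGetD (PySem.List.pyGetD matrix i []) j 0 ≠ 0 then
        let net := net.insert i (net.getD i 0 + 1)
        net.insert j (net.getD j 0 - 1)
      else net) net) PySem.Dict.empty
  ((PySem.List.pyRange 0 size 1).foldl (fun (odds : PySem.Dict Int Int) i =>
    let t := net.getD i 0
    if t ≠ 0 then odds.insert i t else odds) PySem.Dict.empty).items

-- ===== PRECONDITION & SPEC =====
-- Pre_ excludes inputs with a row shorter than len(matrix), on which Python A raises IndexError.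
def Pre_get_odd_vertices (matrix : List (List Int)) : Prop :=
  ∀ row ∈ matrix, matrix.length ≤ row.length
instance (matrix : List (List Int)) : Decidable (Pre_get_odd_vertices matrix) := by
  unfold Pre_get_odd_vertices; infer_instance
def pvWitness_get_odd_vertices : List (List Int) := [[0, 1], [0, 0]]

def Spec_get_odd_vertices (matrix : List (List Int)) (out : List (Int × Int)) : Prop := out = get_odd_vertices_alt matrix
instance (matrix : List (List Int)) (out : List (Int × Int)) : Decidable (Spec_get_odd_vertices matrix out) := by unfold Spec_get_odd_vertices; infer_instance

-- ===== CLAIM (what is proved, stated in full; the proofs are below) =====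
def Claim_equal_get_odd_vertices : Prop := ∀ (matrix : List (List Int)), Dom_get_odd_vertices matrix → Pre_get_odd_vertices matrix → Spec_get_odd_vertices matrix (get_odd_vertices matrix)

-- ===== LEMMAS AND PROOFS =====

-- A's inner loop accumulates (column-i count, row-i count) of nonzero cells.
lemma innerA_eq (matrix : List (List Int)) (i : Int) (l : List Int) (a b : Int) :
    l.foldl (fun (st : Int × Int) j =>
      if PySem.List.pyGetD (PySem.List.pyGetD matrix j []) i 0 ≠ 0 then
        ((if PySem.List.pyGetD (PySem.List.pyGetD matrix i []) j 0 ≠ 0 then (st.1, st.2 + 1) else st).1 + 1,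
         (if PySem.List.pyGetD (PySem.List.pyGetD matrix i []) j 0 ≠ 0 then (st.1, st.2 + 1) else st).2)
      else if PySem.List.pyGetD (PySem.List.pyGetD matrix i []) j 0 ≠ 0 then (st.1, st.2 + 1) else st) (a, b)
    = (a + (l.countP (fun j => decide (PySem.List.pyGetD (PySem.List.pyGetD matrix j []) i 0 ≠ 0)) : Int),
       b + (l.countP (fun j => decide (PySem.List.pyGetD (PySem.List.pyGetD matrix i []) j 0 ≠ 0)) : Int)) := by
  induction l generalizing a b with
  | nil => simp
  | cons x xs ih =>
      rw [List.foldl_cons, List.countP_cons, List.countP_cons]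
      by_cases h1 : PySem.List.pyGetD (PySem.List.pyGetD matrix i []) x 0 ≠ 0 <;> by_cases h2 : PySem.List.pyGetD (PySem.List.pyGetD matrix x []) i 0 ≠ 0
      · rw [if_pos h2, if_pos h1, ih]
        simp [h1, h2, Prod.ext_iff]
        omega
      · rw [if_neg h2, if_pos h1, ih]
        simp [h1, h2, Prod.ext_iff]
        omega
      · rw [if_pos h2, if_neg h1, ih]
        simp [h1, h2, Prod.ext_iff]
        omega
      · rw [if_neg h2, if_neg h1, ih]
        simp [h1, h2]

-- flattening a nested fold over two index lists into a fold over the list of cells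
lemma foldl_nested_eq_cells {σ : Type} (f : σ → Int → Int → σ) (l l2 : List Int) (s0 : σ) :
    l.foldl (fun s i => l2.foldl (fun s j => f s i j) s) s0
    = (l.flatMap (fun i => l2.map (fun j => (i, j)))).foldl (fun s p => f s p.1 p.2) s0 := by
  induction l generalizing s0 with
  | nil => rfl
  | cons x xs ih => simp [List.foldl_append, List.foldl_map, ih]

-- B's cell loop: pointwise value of the net counter
lemma net_invariant (matrix : List (List Int)) (P : List (Int × Int)) (d : PySem.Dict Int Int) (k : Int) :
    (P.foldl (fun (net : PySem.Dict Int Int) p =>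
      if PySem.List.pyGetD (PySem.List.pyGetD matrix p.1 []) p.2 0 ≠ 0 then
        (net.insert p.1 (net.getD p.1 0 + 1)).insert p.2
          ((net.insert p.1 (net.getD p.1 0 + 1)).getD p.2 0 - 1)
      else net) d).getD k 0
    = d.getD k 0 + (P.countP (fun p => k == p.1 && decide (PySem.List.pyGetD (PySem.List.pyGetD matrix p.1 []) p.2 0 ≠ 0)) : Int)
        - (P.countP (fun p => k == p.2 && decide (PySem.List.pyGetD (PySem.List.pyGetD matrix p.1 []) p.2 0 ≠ 0)) : Int) := by
  induction P generalizing d with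
  | nil => simp
  | cons p ps ih =>
      rw [List.foldl_cons, List.countP_cons, List.countP_cons]
      by_cases hg : PySem.List.pyGetD (PySem.List.pyGetD matrix p.1 []) p.2 0 ≠ 0
      · rw [if_pos hg, ih]
        simp only [PySem.Dict.getD_insert]
        by_cases h1 : k = p.1 <;> by_cases h2 : k = p.2 <;>
          simp [h1, h2, hg] <;> omega
      · rw [if_neg hg, ih]
        simp [hg]

-- a Nodup list counts a singled-out element once
lemma countP_point (l : List Int) (k : Int) (q : Int → Bool) (hnd : l.Nodup) (hk : k ∈ l) :
    l.countP (fun j => k == j && q j) = if q k then 1 else 0 := by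
  induction l with
  | nil => cases hk
  | cons x xs ih =>
      simp only [List.countP_cons]
      rcases List.mem_cons.mp hk with rfl | hk'
      · have hx : k ∉ xs := (List.nodup_cons.mp hnd).1
        have h0 : xs.countP (fun j => k == j && q j) = 0 := by
          rw [List.countP_eq_zero]
          intro a ha
          simp only [Bool.and_eq_true, beq_iff_eq, not_and]
          rintro rfl; exact absurd ha hx
        simp [h0]
      · have hxk : k ≠ x := by
          rintro rfl; exact (List.nodup_cons.mp hnd).1 hk'
        rw [ih (List.nodup_cons.mp hnd).2 hk']
        simp [hxk]

lemma cells_out_zero (matrix : List (List Int)) (l l2 : List Int) (k : Int) (hk : k ∉ l) :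
    (l.flatMap (fun i => l2.map (fun j => (i, j)))).countP
        (fun p => k == p.1 && decide (PySem.List.pyGetD (PySem.List.pyGetD matrix p.1 []) p.2 0 ≠ 0)) = 0 := by
  rw [List.countP_eq_zero]
  intro p hp
  rcases List.mem_flatMap.mp hp with ⟨i, hi, hpi⟩
  rcases List.mem_map.mp hpi with ⟨j, _, rfl⟩
  simp only [Bool.and_eq_true, beq_iff_eq, not_and]
  rintro rfl
  exact absurd hi hk

-- out-count over the cells = nonzero count of row k
lemma cells_out_count (matrix : List (List Int)) (l l2 : List Int) (k : Int)
    (hnd : l.Nodup) (hk : k ∈ l) :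
    (l.flatMap (fun i => l2.map (fun j => (i, j)))).countP
        (fun p => k == p.1 && decide (PySem.List.pyGetD (PySem.List.pyGetD matrix p.1 []) p.2 0 ≠ 0))
    = l2.countP (fun j => decide (PySem.List.pyGetD (PySem.List.pyGetD matrix k []) j 0 ≠ 0)) := by
  induction l with
  | nil => cases hk
  | cons x xs ih =>
      rw [List.flatMap_cons, List.countP_append, List.countP_map]
      rcases List.mem_cons.mp hk with rfl | hk'
      · rw [cells_out_zero matrix xs l2 k (List.nodup_cons.mp hnd).1]
        simp [Function.comp_def]
      · have hxk : k ≠ x := by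
          rintro rfl; exact (List.nodup_cons.mp hnd).1 hk'
        rw [ih (List.nodup_cons.mp hnd).2 hk']
        have h0 : l2.countP ((fun p => k == p.1 && decide (PySem.List.pyGetD (PySem.List.pyGetD matrix p.1 []) p.2 0 ≠ 0)) ∘ fun j => (x, j)) = 0 := by
          rw [List.countP_eq_zero]; intro a ha; simp [hxk]
        rw [h0]
        omega

-- in-count over the cells = nonzero count of column k
lemma cells_in_count (matrix : List (List Int)) (l l2 : List Int) (k : Int)
    (hnd : l2.Nodup) (hk : k ∈ l2) :
    (l.flatMap (fun i => l2.map (fun j => (i, j)))).countP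
        (fun p => k == p.2 && decide (PySem.List.pyGetD (PySem.List.pyGetD matrix p.1 []) p.2 0 ≠ 0))
    = l.countP (fun i => decide (PySem.List.pyGetD (PySem.List.pyGetD matrix i []) k 0 ≠ 0)) := by
  induction l with
  | nil => rfl
  | cons x xs ih =>
      rw [List.flatMap_cons, List.countP_append, List.countP_map, List.countP_cons, ih]
      have h1 : l2.countP ((fun p => k == p.2 && decide (PySem.List.pyGetD (PySem.List.pyGetD matrix p.1 []) p.2 0 ≠ 0)) ∘ fun j => (x, j))
          = if decide (PySem.List.pyGetD (PySem.List.pyGetD matrix x []) k 0 ≠ 0) then 1 else 0 := by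
        have h := countP_point l2 k (fun j => decide (PySem.List.pyGetD (PySem.List.pyGetD matrix x []) j 0 ≠ 0)) hnd hk
        simpa [Function.comp_def] using h
      rw [h1]
      omega

-- value of B's net counter at an index of the range
lemma netval (matrix : List (List Int)) (i : Int)
    (hi : i ∈ PySem.List.pyRange 0 (matrix.length : Int) 1) :
    ((PySem.List.pyRange 0 (matrix.length : Int) 1).foldl (fun net a =>
      (PySem.List.pyRange 0 (matrix.length : Int) 1).foldl (fun (net : PySem.Dict Int Int) j =>
        if PySem.List.pyGetD (PySem.List.pyGetD matrix a []) j 0 ≠ 0 then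
          (net.insert a (net.getD a 0 + 1)).insert j
            ((net.insert a (net.getD a 0 + 1)).getD j 0 - 1)
        else net) net) PySem.Dict.empty).getD i 0
    = ((PySem.List.pyRange 0 (matrix.length : Int) 1).countP (fun j => decide (PySem.List.pyGetD (PySem.List.pyGetD matrix i []) j 0 ≠ 0)) : Int)
      - ((PySem.List.pyRange 0 (matrix.length : Int) 1).countP (fun j => decide (PySem.List.pyGetD (PySem.List.pyGetD matrix j []) i 0 ≠ 0)) : Int) := by
  have hflat :
      ((PySem.List.pyRange 0 (matrix.length : Int) 1).foldl (fun net a =>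
        (PySem.List.pyRange 0 (matrix.length : Int) 1).foldl (fun (net : PySem.Dict Int Int) j =>
          if PySem.List.pyGetD (PySem.List.pyGetD matrix a []) j 0 ≠ 0 then
            (net.insert a (net.getD a 0 + 1)).insert j
              ((net.insert a (net.getD a 0 + 1)).getD j 0 - 1)
          else net) net) PySem.Dict.empty)
      = (((PySem.List.pyRange 0 (matrix.length : Int) 1).flatMap (fun a =>
          (PySem.List.pyRange 0 (matrix.length : Int) 1).map (fun j => (a, j)))).foldl
            (fun (net : PySem.Dict Int Int) p =>
              if PySem.List.pyGetD (PySem.List.pyGetD matrix p.1 []) p.2 0 ≠ 0 then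
                (net.insert p.1 (net.getD p.1 0 + 1)).insert p.2
                  ((net.insert p.1 (net.getD p.1 0 + 1)).getD p.2 0 - 1)
              else net) PySem.Dict.empty) :=
    foldl_nested_eq_cells _ _ _ _
  rw [hflat, net_invariant,
    cells_out_count matrix _ _ i (PySem.List.nodup_pyRange_one 0 _) hi,
    cells_in_count matrix _ _ i (PySem.List.nodup_pyRange_one 0 _) hi]
  simp

-- ===== VERDICT (by name: the statement is the Claim_ definition above) =====
theorem get_odd_vertices_spec : Claim_equal_get_odd_vertices := by
  intro matrix _ _
  unfold Spec_get_odd_vertices get_odd_vertices get_odd_vertices_alt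
  refine congrArg PySem.Dict.items ?_
  apply PySem.List.foldl_congr_mem
  intro odds i hi
  rw [innerA_eq matrix i (PySem.List.pyRange 0 (matrix.length : Int) 1) 0 0,
    netval matrix i hi]
  simp
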